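-- pv_equiv track=rewrite | github.com/thelastpickle/cassandra-medusa | medusa/restore_node.py | keyspace_is_allowed_to_restore
-- ===== SOURCE A (Python) =====
-- def keyspace_is_allowed_to_restore(keyspace, keep_auth, fqtns_to_restore):
--     if keyspace == 'system' or keyspace == 'system_schema':
--         return False
--
--     if keyspace == 'system_auth' and keep_auth is True:
--         return False
--
--     # a keyspace is allowed to restore if there is at least one fqtn from this keyspace
--     # so we get keyspaces from all the fqtns and make it a set to remove duplicates
--     keyspaces_to_restore = {fqtn.split('.')[0] for fqtn in fqtns_to_restore}
--     # then we check if the keyspace we are restoring is present in that set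
--     if keyspace not in keyspaces_to_restore:
--         return False
--
--     return True
-- ===== SOURCE B (Python) =====
-- def keyspace_is_allowed_to_restore(keyspace, keep_auth, fqtns_to_restore):
--     if keyspace in ('system', 'system_schema') or (keyspace == 'system_auth' and keep_auth is True):
--         return False
--     if '.' in keyspace:
--         # the keyspace part of a fqtn never contains a dot, so no fqtn can belong to it
--         return False
--     prefix = keyspace + '.'
--     for fqtn in fqtns_to_restore:
--         # fqtn belongs to the keyspace iff it IS the keyspace or starts with "<keyspace>."
--         if fqtn == keyspace or fqtn.startswith(prefix):
--             return True
--     return False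
-- ===== Notes on version B (the rewrite author's own statement) =====
-- stated objective: alternative
-- what changed: Instead of splitting every fqtn on '.' and collecting the prefixes into a set to test membership, B never parses any fqtn: it tests each one directly by string-prefix comparison (fqtn == keyspace or fqtn.startswith(keyspace + '.')), after a guard that a keyspace containing a dot can match nothing, and returns early on the first match.
import Mathlib
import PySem

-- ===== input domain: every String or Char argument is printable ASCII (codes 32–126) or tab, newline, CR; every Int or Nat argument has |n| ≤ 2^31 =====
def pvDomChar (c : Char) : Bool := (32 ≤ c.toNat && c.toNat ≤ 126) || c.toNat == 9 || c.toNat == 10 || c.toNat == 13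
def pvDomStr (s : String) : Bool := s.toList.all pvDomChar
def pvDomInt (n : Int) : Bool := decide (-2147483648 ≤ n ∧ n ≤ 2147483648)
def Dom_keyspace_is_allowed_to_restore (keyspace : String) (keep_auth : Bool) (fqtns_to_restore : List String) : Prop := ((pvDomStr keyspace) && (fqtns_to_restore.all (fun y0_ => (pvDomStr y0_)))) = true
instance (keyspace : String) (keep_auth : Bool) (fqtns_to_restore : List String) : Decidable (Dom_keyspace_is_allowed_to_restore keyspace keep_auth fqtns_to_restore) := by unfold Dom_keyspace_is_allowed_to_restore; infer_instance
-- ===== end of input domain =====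

-- B tests each fqtn by direct string-prefix comparison instead of splitting it and collecting a set of prefixes (alternative algorithm, same cost).
-- ===== PORT A =====
def keyspace_is_allowed_to_restore (keyspace : String) (keep_auth : Bool) (fqtns_to_restore : List String) : Bool :=
  if keyspace == "system" || keyspace == "system_schema" then false
  else if keyspace == "system_auth" && keep_auth then false
  else
    let keyspaces_to_restore : PySem.Set String :=
      PySem.Set.ofList (fqtns_to_restore.map (fun fqtn => ((PySem.Str.split? fqtn ".").getD []).headD ""))
    if !(PySem.Set.contains keyspaces_to_restore keyspace) then false
    else true

-- ===== PORT B =====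
def keyspace_is_allowed_to_restore_alt (keyspace : String) (keep_auth : Bool) (fqtns_to_restore : List String) : Bool :=
  if (keyspace == "system" || keyspace == "system_schema") || (keyspace == "system_auth" && keep_auth) then false
  else if PySem.Str.isIn "." keyspace then false
  else
    let pre := keyspace ++ "."
    fqtns_to_restore.any (fun fqtn => fqtn == keyspace || PySem.Str.startswith fqtn pre)

-- ===== PRECONDITION & SPEC =====
def Spec_keyspace_is_allowed_to_restore (keyspace : String) (keep_auth : Bool) (fqtns_to_restore : List String) (out : Bool) : Prop := out = keyspace_is_allowed_to_restore_alt keyspace keep_auth fqtns_to_restore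
instance (keyspace : String) (keep_auth : Bool) (fqtns_to_restore : List String) (out : Bool) : Decidable (Spec_keyspace_is_allowed_to_restore keyspace keep_auth fqtns_to_restore out) := by unfold Spec_keyspace_is_allowed_to_restore; infer_instance

-- ===== CLAIM (what is proved, stated in full; the proofs are below) =====
def Claim_equal_keyspace_is_allowed_to_restore : Prop := ∀ (keyspace : String) (keep_auth : Bool) (fqtns_to_restore : List String), Dom_keyspace_is_allowed_to_restore keyspace keep_auth fqtns_to_restore → Spec_keyspace_is_allowed_to_restore keyspace keep_auth fqtns_to_restore (keyspace_is_allowed_to_restore keyspace keep_auth fqtns_to_restore)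

-- ===== LEMMAS AND PROOFS =====

theorem go_acc (sep : List Char) : ∀ (fuel : Nat) (l cur : List Char) (accs : List (List Char)),
    PySem.Chars.splitOn.go sep fuel l cur accs
      = accs.reverse ++ PySem.Chars.splitOn.go sep fuel l cur [] := by
  intro fuel
  induction fuel with
  | zero => intro l cur accs; simp [PySem.Chars.splitOn.go]
  | succ n ih =>
    intro l cur accs
    cases l with
    | nil => simp [PySem.Chars.splitOn.go]
    | cons c rest =>
      rw [PySem.Chars.splitOn.go.eq_def, PySem.Chars.splitOn.go.eq_def]
      by_cases h : sep.isPrefixOf (c :: rest) = true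
      · simp only [h, if_true]
        rw [ih _ _ (cur.reverse :: accs), ih _ _ [cur.reverse]]
        simp
      · simp only [Bool.not_eq_true] at h
        simp only [h, Bool.false_eq_true, if_false]
        rw [ih _ _ accs]

theorem go_head : ∀ (fuel : Nat) (l cur : List Char), l.length ≤ fuel →
    ∃ t, PySem.Chars.splitOn.go ['.'] fuel l cur []
      = (cur.reverse ++ l.takeWhile (fun c => c != '.')) :: t := by
  intro fuel
  induction fuel with
  | zero =>
    intro l cur h
    have : l = [] := List.eq_nil_of_length_eq_zero (Nat.le_zero.mp h)
    subst this
    exact ⟨[], by simp [PySem.Chars.splitOn.go]⟩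
  | succ n ih =>
    intro l cur h
    cases l with
    | nil => exact ⟨[], by simp [PySem.Chars.splitOn.go]⟩
    | cons c rest =>
      rw [PySem.Chars.splitOn.go.eq_def]
      by_cases hc : c = '.'
      · subst hc
        have hp : List.isPrefixOf ['.'] ('.' :: rest) = true := by
          simp [List.isPrefixOf]
        simp only [hp, if_true]
        rw [go_acc ['.'] n _ _ [cur.reverse]]
        obtain ⟨t, ht⟩ := ih (List.drop 1 ('.' :: rest)) [] (by simpa using Nat.le_of_succ_le_succ h)
        refine ⟨List.takeWhile (fun c => c != '.') rest :: t, ?_⟩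
        simp only [List.drop_succ_cons, List.drop_zero] at ht
        rw [show (['.'].length) = 1 from rfl, List.drop_succ_cons, List.drop_zero, ht]
        simp
      · have hp : List.isPrefixOf ['.'] (c :: rest) = false := by
          simp [List.isPrefixOf]; exact fun h' => hc h'.symm
        simp only [hp, Bool.false_eq_true, if_false]
        obtain ⟨t, ht⟩ := ih rest (c :: cur) (by simpa using Nat.le_of_succ_le_succ h)
        refine ⟨t, ?_⟩
        rw [ht, List.takeWhile_cons]
        simp [hc]

theorem splitOn_dot_head (cs : List Char) :
    ∃ t, PySem.Chars.splitOn cs ['.'] = (cs.takeWhile (fun c => c != '.')) :: t := by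
  unfold PySem.Chars.splitOn
  simpa using go_head (cs.length + 1) cs [] (Nat.le_succ _)

theorem firstPart_eq (fqtn : String) :
    ((PySem.Str.split? fqtn ".").getD []).headD ""
      = String.ofList (fqtn.toList.takeWhile (fun c => c != '.')) := by
  obtain ⟨t, ht⟩ := splitOn_dot_head fqtn.toList
  simp [PySem.Str.split?, PySem.Chars.split?, ht]

theorem takeWhile_dot_eq_iff : ∀ (cs k : List Char), '.' ∉ k →
    ((cs.takeWhile (fun c => c != '.') = k) ↔ (cs = k ∨ k ++ ['.'] <+: cs)) := by
  intro cs
  induction cs with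
  | nil =>
    intro k _
    simp [List.prefix_nil]
  | cons c rest ih =>
    intro k hk
    rw [List.takeWhile_cons]
    by_cases hc : c = '.'
    · subst hc
      simp only [bne_self_eq_false, Bool.false_eq_true, if_false]
      cases k with
      | nil =>
        simp [List.prefix_cons_iff]
      | cons a k' =>
        have ha : a ≠ '.' := fun h => hk (h ▸ List.mem_cons_self)
        constructor
        · intro h; exact absurd h.symm (List.cons_ne_nil a k')
        · rintro (h | h)
          · exact absurd (by rw [← h]; exact List.mem_cons_self) hk
          · rw [List.cons_append, List.cons_prefix_cons] at h
            exact absurd h.1 ha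
    · have hcb : (c != '.') = true := by simp [hc]
      simp only [hcb, if_true]
      cases k with
      | nil =>
        constructor
        · intro h; exact absurd h (List.cons_ne_nil _ _)
        · rintro (h | h)
          · exact absurd h (List.cons_ne_nil _ _)
          · rw [List.nil_append, List.cons_prefix_cons] at h
            exact absurd h.1.symm hc
      | cons a k' =>
        have hk' : '.' ∉ k' := fun h => hk (List.mem_cons_of_mem _ h)
        rw [List.cons_append]
        constructor
        · intro h
          obtain ⟨h1, h2⟩ := List.cons.injEq .. ▸ h
          rcases (ih k' hk').mp h2 with h3 | h3
          · exact Or.inl (by rw [h1, h3])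
          · exact Or.inr (List.cons_prefix_cons.mpr ⟨h1.symm, h3⟩)
        · rintro (h | h)
          · injection h with h1 h2
            rw [h1, (ih k' hk').mpr (Or.inl h2)]
          · obtain ⟨h1, h2⟩ := List.cons_prefix_cons.mp h
            rw [h1, (ih k' hk').mpr (Or.inr h2)]

theorem contains_ofList_map_eq_any {α β : Type} [DecidableEq β] (l : List α) (g : α → β) (k : β) :
    PySem.Set.contains (PySem.Set.ofList (l.map g)) k = l.any (fun x => g x == k) := by
  rcases h : l.any (fun x => g x == k) with _ | _
  · simp only [List.any_eq_false, beq_iff_eq] at h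
    rw [Bool.eq_false_iff]
    intro hc
    rw [PySem.Set.contains_iff, PySem.Set.mem_ofList, List.mem_map] at hc
    obtain ⟨x, hx, hgx⟩ := hc
    exact h x hx hgx
  · simp only [List.any_eq_true, beq_iff_eq] at h
    obtain ⟨x, hx, hgx⟩ := h
    rw [PySem.Set.contains_iff, PySem.Set.mem_ofList, List.mem_map]
    exact ⟨x, hx, hgx⟩

theorem string_eq_iff_toList (s t : String) : s = t ↔ s.toList = t.toList :=
  ⟨fun h => h ▸ rfl, fun h => String.toList_inj.mp h⟩

theorem elt_eq (keyspace : String) (hk : '.' ∉ keyspace.toList) (fqtn : String) :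
    (((PySem.Str.split? fqtn ".").getD []).headD "" == keyspace)
      = (fqtn == keyspace || PySem.Str.startswith fqtn (keyspace ++ ".")) := by
  rw [firstPart_eq]
  have h1 : (String.ofList (fqtn.toList.takeWhile (fun c => c != '.')) = keyspace)
      ↔ (fqtn.toList.takeWhile (fun c => c != '.') = keyspace.toList) := by
    rw [string_eq_iff_toList]; simp
  have h2 := takeWhile_dot_eq_iff fqtn.toList keyspace.toList hk
  have h3 : PySem.Str.startswith fqtn (keyspace ++ ".") = true
      ↔ (keyspace.toList ++ ['.'] <+: fqtn.toList) := by
    simp [PySem.Chars.startswith_iff]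
  have h4 : (fqtn = keyspace) ↔ (fqtn.toList = keyspace.toList) := string_eq_iff_toList _ _
  rcases hb : (fqtn == keyspace || PySem.Str.startswith fqtn (keyspace ++ ".")) with _ | _
  · simp only [Bool.or_eq_false_iff, beq_eq_false_iff_ne, ne_eq] at hb
    rw [beq_eq_false_iff_ne]
    intro he
    rcases (h2.mp (h1.mp he)) with h | h
    · exact hb.1 (h4.mpr h)
    · rw [← h3] at h; rw [h] at hb; exact Bool.false_ne_true hb.2.symm
  · simp only [Bool.or_eq_true, beq_iff_eq] at hb
    rw [beq_iff_eq, h1, h2]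
    rcases hb with h | h
    · exact Or.inl (h4.mp h)
    · exact Or.inr (h3.mp h)

theorem elt_false_of_dot (keyspace : String) (hk : '.' ∈ keyspace.toList) (fqtn : String) :
    (((PySem.Str.split? fqtn ".").getD []).headD "" == keyspace) = false := by
  rw [firstPart_eq, beq_eq_false_iff_ne]
  intro he
  have : keyspace.toList = fqtn.toList.takeWhile (fun c => c != '.') := by
    rw [← he]; simp
  rw [this] at hk
  have := List.mem_takeWhile_imp hk
  simp at this

-- ===== VERDICT (by name: the statement is the Claim_ definition above) =====
theorem keyspace_is_allowed_to_restore_spec : Claim_equal_keyspace_is_allowed_to_restore := by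
  intro keyspace keep_auth fqtns _
  unfold Spec_keyspace_is_allowed_to_restore keyspace_is_allowed_to_restore keyspace_is_allowed_to_restore_alt
  by_cases hg : ((keyspace == "system" || keyspace == "system_schema")
      || (keyspace == "system_auth" && keep_auth)) = true
  · rcases Bool.or_eq_true_iff.mp hg with h | h
    · simp [h]
    · simp only [Bool.and_eq_true, beq_iff_eq] at h
      simp [h.1, h.2]
  · simp only [Bool.or_eq_true_iff, not_or, Bool.not_eq_true] at hg
    obtain ⟨⟨h1, h2⟩, h3⟩ := hg
    simp only [h1, h2, h3, Bool.or_self, Bool.false_eq_true, if_false]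
    by_cases hd : '.' ∈ keyspace.toList
    · have hIn : PySem.Str.isIn "." keyspace = true := by
        rw [PySem.Str.isIn_iff_infix]
        simpa [List.singleton_infix_iff] using hd
      have hany : (fqtns.any fun x => ((PySem.Str.split? x ".").getD []).headD "" == keyspace)
          = false := by
        rw [List.any_eq_false]
        intro x hx
        rw [elt_false_of_dot keyspace hd x]
        exact Bool.false_ne_true
      simp only [hIn, if_true]
      rw [contains_ofList_map_eq_any, hany]
      rfl
    · have hIn : PySem.Str.isIn "." keyspace = false := by
        rw [Bool.eq_false_iff]
        intro h
        rw [PySem.Str.isIn_iff_infix] at h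
        exact hd (by simpa [List.singleton_infix_iff] using h)
      simp only [hIn, Bool.false_eq_true, if_false]
      rw [contains_ofList_map_eq_any,
        show (fun x => ((PySem.Str.split? x ".").getD []).headD "" == keyspace)
          = (fun fqtn => fqtn == keyspace || PySem.Str.startswith fqtn (keyspace ++ "."))
          from funext (elt_eq keyspace hd)]
      rcases h : fqtns.any (fun fqtn => fqtn == keyspace
          || PySem.Str.startswith fqtn (keyspace ++ ".")) with _ | _ <;> simp [h]
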